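-- pv_equiv track=rewrite | github.com/bingran-you/smolclaw | claw_gdoc/api/render.py | _paragraph_ranges
-- ===== SOURCE A (Python) =====
-- def normalize_body_text(text: str | None) -> str:
--     text = text or ""
--     if not text.endswith("\n"):
--         text += "\n"
--     if not text:
--         return "\n"
--     return text
--
-- def _paragraph_ranges(text: str) -> list[tuple[int, int]]:
--     ranges: list[tuple[int, int]] = []
--     start = 1
--     for chunk in normalize_body_text(text).splitlines(keepends=True):
--         end = start + len(chunk)
--         ranges.append((start, end))
--         start = end
--     return ranges
-- ===== SOURCE B (Python) =====
-- def normalize_body_text(text):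
--     text = text or ""
--     if not text.endswith("\n"):
--         text += "\n"
--     if not text:
--         return "\n"
--     return text
--
-- def _paragraph_ranges(text):
--     # Scan for line-break end positions directly (no splitlines), then zip
--     # consecutive boundaries into (start, end) 1-based ranges.
--     s = normalize_body_text(text)
--     n = len(s)
--     bounds = [0] + [i + 1 for i in range(n)
--                     if s[i] == "\n" or (s[i] == "\r" and (i + 1 == n or s[i + 1] != "\n"))]
--     return [(a + 1, b + 1) for a, b in zip(bounds, bounds[1:])]
-- ===== Notes on version B (the rewrite author's own statement) =====
-- stated objective: alternative
-- what changed: B drops splitlines and the running (start,end) accumulator: it scans the normalized string once for line-break end positions, builds a boundary/prefix-offset table, and zips consecutive boundaries into ranges.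
import Mathlib
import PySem

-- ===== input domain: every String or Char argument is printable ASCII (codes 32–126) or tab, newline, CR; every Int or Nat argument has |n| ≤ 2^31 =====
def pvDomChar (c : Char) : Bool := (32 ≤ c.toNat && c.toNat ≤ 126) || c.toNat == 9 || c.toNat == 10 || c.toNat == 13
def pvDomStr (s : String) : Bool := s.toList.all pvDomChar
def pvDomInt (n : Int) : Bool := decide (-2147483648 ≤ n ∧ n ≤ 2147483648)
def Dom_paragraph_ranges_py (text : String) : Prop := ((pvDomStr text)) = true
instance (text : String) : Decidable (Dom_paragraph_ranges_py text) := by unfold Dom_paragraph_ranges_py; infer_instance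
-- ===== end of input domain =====

-- B replaces splitlines(keepends=True) + a running (start,end) accumulator by a direct scan for
-- line-break end positions, a boundary table, and a zip of consecutive boundaries (alternative decomposition).

-- ===== PORT A =====
-- normalize_body_text, shared module helper called by both Pythons
def normBody (text : String) : String :=
  let t := if text = "" then "" else text         -- text = text or ""  (a str is falsy iff empty)
  let t := if !(PySem.Str.endswith t "\n") then t ++ "\n" else t
  if t = "" then "\n" else t                      -- dead branch kept from A

-- splitlines(keepends=True), hand-ported over List Char; exact for the line-break
-- characters reachable inside Dom ('\n', '\r', '\r\n').
def slkeep : List Char → List (List Char)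
  | [] => []
  | '\r' :: '\n' :: rest => ['\r', '\n'] :: slkeep rest
  | '\n' :: rest => ['\n'] :: slkeep rest
  | '\r' :: rest => ['\r'] :: slkeep rest
  | c :: rest =>
    match slkeep rest with
    | [] => [[c]]
    | ch :: chs => (c :: ch) :: chs

def paragraph_ranges_py (text : String) : List (Int × Int) :=
  ((slkeep (normBody text).toList).foldl
    (fun (acc : List (Int × Int) × Int) chunk =>
      let e := acc.2 + (chunk.length : Int)
      (acc.1 ++ [(acc.2, e)], e))
    ([], 1)).1

-- ===== PORT B =====
-- s[i] == '\n' or (s[i] == '\r' and (i+1 == n or s[i+1] != '\n'))   (all indices used are in range)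
def pvBreakAfter (cs : List Char) (i : Nat) : Bool :=
  cs.getD i ' ' == '\n' ||
    (cs.getD i ' ' == '\r' && (i + 1 == cs.length || !(cs.getD (i + 1) ' ' == '\n')))

def paragraph_ranges_py_alt (text : String) : List (Int × Int) :=
  let cs := (normBody text).toList
  let bounds : List Nat := 0 :: ((List.range cs.length).filter (pvBreakAfter cs)).map (· + 1)
  (bounds.zip (bounds.drop 1)).map (fun p => ((p.1 : Int) + 1, (p.2 : Int) + 1))

-- ===== PRECONDITION & SPEC =====
def Spec_paragraph_ranges_py (text : String) (out : List (Int × Int)) : Prop := out = paragraph_ranges_py_alt text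
instance (text : String) (out : List (Int × Int)) : Decidable (Spec_paragraph_ranges_py text out) := by unfold Spec_paragraph_ranges_py; infer_instance

-- ===== CLAIM (what is proved, stated in full; the proofs are below) =====
def Claim_equal_paragraph_ranges_py : Prop := ∀ (text : String), Dom_paragraph_ranges_py text → Spec_paragraph_ranges_py text (paragraph_ranges_py text)

-- ===== LEMMAS AND PROOFS =====

-- break end positions of cs, recursive form
def brk : List Char → List Nat
  | [] => []
  | '\r' :: '\n' :: rest => 2 :: (brk rest).map (· + 2)
  | '\n' :: rest => 1 :: (brk rest).map (· + 1)
  | '\r' :: rest => 1 :: (brk rest).map (· + 1)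
  | _ :: rest => (brk rest).map (· + 1)

-- chunk-end positions from chunk lengths
def pfx : List Nat → List Nat
  | [] => []
  | a :: l => a :: (pfx l).map (· + a)

-- ranges from a start and chunk lengths
def rngsL : Int → List Nat → List (Int × Int)
  | _, [] => []
  | s, a :: l => (s, s + (a : Int)) :: rngsL (s + (a : Int)) l

theorem foldlA (chs : List (List Char)) : ∀ (acc : List (Int × Int)) (s : Int),
    (chs.foldl (fun (acc : List (Int × Int) × Int) chunk =>
        let e := acc.2 + (chunk.length : Int)
        (acc.1 ++ [(acc.2, e)], e)) (acc, s)).1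
      = acc ++ rngsL s (chs.map List.length) := by
  induction chs with
  | nil => intro acc s; simp [rngsL]
  | cons ch chs ih =>
    intro acc s
    simp only [List.foldl_cons, List.map_cons, rngsL]
    rw [ih]
    simp

theorem breakAfter_shift (c : Char) (cs : List Char) (i : Nat) :
    pvBreakAfter (c :: cs) (i + 1) = pvBreakAfter cs i := by
  simp only [pvBreakAfter, List.getD_cons_succ, List.length_cons]
  have : (i + 1 + 1 == cs.length + 1) = (i + 1 == cs.length) := by simp
  rw [this]

theorem filter_step (c : Char) (rest : List Char)
    (ih : List.map (fun x => x + 1) (List.filter (pvBreakAfter rest) (List.range rest.length))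
            = brk rest) :
    List.map (fun x => x + 1)
        (List.filter (pvBreakAfter (c :: rest)) (List.range (c :: rest).length))
      = if pvBreakAfter (c :: rest) 0 then 1 :: (brk rest).map (· + 1)
        else (brk rest).map (· + 1) := by
  rw [List.length_cons, List.range_succ_eq_map]
  simp only [List.filter_cons, List.filter_map, Function.comp_def, Nat.succ_eq_add_one]
  rw [show (List.filter (fun x => pvBreakAfter (c :: rest) (x + 1)) (List.range rest.length))
        = List.filter (pvBreakAfter rest) (List.range rest.length) from
    List.filter_congr fun x _ => breakAfter_shift c rest x]
  rw [← ih, List.map_map]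
  by_cases h : pvBreakAfter (c :: rest) 0 = true
  · simp only [h, if_true, List.map_cons, List.map_map, Function.comp_def, Nat.zero_add]
  · simp only [Bool.not_eq_true] at h
    simp only [h, Bool.false_eq_true, if_false, List.map_map, Function.comp_def]

theorem filter_eq_brk (cs : List Char) :
    ((List.range cs.length).filter (pvBreakAfter cs)).map (· + 1) = brk cs := by
  fun_induction brk cs with
  | case1 => simp
  | case2 rest ih =>
    rw [List.length_cons, List.length_cons, List.range_succ_eq_map, List.range_succ_eq_map]
    have h0 : pvBreakAfter ('\r' :: '\n' :: rest) 0 = false := by simp [pvBreakAfter]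
    have h1 : pvBreakAfter ('\r' :: '\n' :: rest) 1 = true := by simp [pvBreakAfter]
    simp only [List.filter_cons, List.filter_map, List.map_map, Function.comp_def,
      Nat.succ_eq_add_one, Nat.zero_add, h0, h1, Bool.false_eq_true, ↓reduceIte]
    rw [show (List.filter (fun x => pvBreakAfter ('\r' :: '\n' :: rest) (x + 1 + 1))
          (List.range rest.length)) = List.filter (pvBreakAfter rest) (List.range rest.length) from by
      apply List.filter_congr; intro x _; rw [breakAfter_shift, breakAfter_shift]]
    rw [← ih, List.map_map]
    simp only [List.map_cons, List.map_map, Function.comp_def, Nat.succ_eq_add_one, Nat.zero_add,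
      Nat.reduceAdd]
  | case3 rest ih =>
    rw [filter_step _ _ ih]
    have h0 : pvBreakAfter ('\n' :: rest) 0 = true := by simp [pvBreakAfter]
    rw [h0, if_pos rfl]
  | case4 rest h ih =>
    rw [filter_step _ _ ih]
    have h0 : pvBreakAfter ('\r' :: rest) 0 = true := by
      rcases rest with _ | ⟨d, ds⟩
      · simp [pvBreakAfter]
      · have hd : ¬ (d = '\n') := by
          intro he; subst he; exact h ds rfl
        simp [pvBreakAfter, hd]
    rw [h0, if_pos rfl]
  | case5 c rest h1 h2 h3 ih =>
    rw [filter_step _ _ ih]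
    have h0 : pvBreakAfter (c :: rest) 0 = false := by
      simp only [pvBreakAfter, List.getD_cons_zero, Bool.or_eq_false_iff, Bool.and_eq_false_iff,
        beq_eq_false_iff_ne, ne_eq]
      exact ⟨h2, Or.inl h3⟩
    rw [h0]
    simp

theorem brk_cons_other (c : Char) (rest : List Char) (h2 : ¬ c = '\n') (h3 : ¬ c = '\r') :
    brk (c :: rest) = (brk rest).map (· + 1) := by
  rw [brk.eq_def]
  split
  all_goals first
    | rfl
    | (rename_i heq; injection heq with e1 e2; exact absurd e1 (by assumption))
    | (rename_i h; simp_all)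

theorem brk_cr (rest : List Char) (h : ∀ ds, rest ≠ '\n' :: ds) :
    brk ('\r' :: rest) = 1 :: (brk rest).map (· + 1) := by
  rw [brk.eq_def]
  split
  all_goals try rfl
  case h_5 =>
    rename_i hn hr heq
    injection heq with e1 e2
    exact absurd e1.symm hr
  all_goals simp_all

theorem slkeep_ne_nil (cs : List Char) (h : cs ≠ []) : slkeep cs ≠ [] := by
  fun_induction slkeep cs with
  | case1 => exact absurd rfl h
  | case2 rest ih => simp
  | case3 rest ih => simp
  | case4 rest h' ih => simp
  | case5 c rest h1 h2 h3 ih hm => simp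
  | case6 c rest h1 h2 h3 ih hm => simp

theorem brk_eq_pfx (cs : List Char) (h : cs.getLast? = some '\n') :
    brk cs = pfx ((slkeep cs).map List.length) := by
  fun_induction slkeep cs with
  | case1 => simp at h
  | case2 rest ih =>
    rcases rest with _ | ⟨d, ds⟩
    · simp [brk, slkeep, pfx]
    · rw [List.getLast?_cons_cons, List.getLast?_cons_cons] at h
      simp only [brk, List.map_cons, pfx, ih h, List.length_cons]
      simp
  | case3 rest ih =>
    rcases rest with _ | ⟨d, ds⟩
    · simp [brk, slkeep, pfx]
    · rw [List.getLast?_cons_cons] at h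
      simp only [brk, List.map_cons, pfx, ih h, List.length_cons]
      simp
  | case4 rest h' ih =>
    have hno : ∀ ds, rest ≠ '\n' :: ds := by
      intro ds he; exact h' ds he
    rw [brk_cr rest hno]
    rcases rest with _ | ⟨d, ds⟩
    · simp [brk, slkeep, pfx]
    · rw [List.getLast?_cons_cons] at h
      simp only [List.map_cons, pfx, ih h, List.length_cons]
      simp
  | case5 c rest h1 h2 h3 heq ih =>
    rcases rest with _ | ⟨d, ds⟩
    · simp only [List.getLast?_singleton, Option.some.injEq] at h
      exact absurd h h2
    · exact absurd heq (slkeep_ne_nil _ (by simp))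
  | case6 c rest h1 h2 h3 ch chs heq ih =>
    have hne : rest ≠ [] := by
      intro hn; subst hn; simp [slkeep] at heq
    have hlast : rest.getLast? = some '\n' := by
      rcases rest with _ | ⟨d, ds⟩
      · exact absurd rfl hne
      · rwa [List.getLast?_cons_cons] at h
    rw [brk_cons_other c rest h2 h3, ih hlast, heq]
    simp only [List.map_cons, pfx, List.map_map, List.length_cons, Function.comp_def]
    congr 1

theorem zip_pfx (lens : List Nat) : ∀ (b : Nat),
    (((b :: (pfx lens).map (· + b)).zip ((pfx lens).map (· + b))).map
        (fun p => ((p.1 : Int) + 1, (p.2 : Int) + 1)))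
      = rngsL ((b : Int) + 1) lens := by
  induction lens with
  | nil => intro b; simp [pfx, rngsL]
  | cons a l ih =>
    intro b
    simp only [pfx, List.map_cons, List.map_map, List.zip_cons_cons, rngsL]
    have h2 : ((pfx l).map ((· + b) ∘ (· + a))) = (pfx l).map (· + (a + b)) := by
      apply List.map_congr_left; intro x _; simp; omega
    rw [h2]
    rw [ih (a + b)]
    have e1 : ((a + b : Nat) : Int) + 1 = (b : Int) + 1 + a := by push_cast; ring
    rw [e1]

theorem norm_ends_nl (text : String) : ((normBody text).toList).getLast? = some '\n' := by
  by_cases h1 : text = ""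
  · subst h1; decide
  · by_cases h2 : PySem.Str.endswith text "\n" = true
    · have h2' : PySem.Chars.endswith text.toList ['\n'] = true := by simpa using h2
      have hn : normBody text = text := by
        simp [normBody, h1, h2']
      rw [hn]
      have hsuf : ['\n'] <:+ text.toList := by
        have := h2
        rw [PySem.Str.endswith_eq] at this
        rw [PySem.Chars.endswith_iff] at this
        simpa using this
      obtain ⟨pre, hpre⟩ := hsuf
      rw [← hpre, List.getLast?_concat]
    · have hne : text ++ "\n" ≠ "" := by
        intro he
        have := congrArg String.toList he
        simp at this
      have h2' : PySem.Chars.endswith text.toList ['\n'] = false := by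
        simpa [Bool.not_eq_true] using h2
      have hn : normBody text = text ++ "\n" := by
        simp [normBody, h1, h2', hne]
      rw [hn, String.toList_append]
      exact List.getLast?_concat

-- ===== VERDICT (by name: the statement is the Claim_ definition above) =====
theorem paragraph_ranges_py_spec : Claim_equal_paragraph_ranges_py := by
  intro text _
  unfold Spec_paragraph_ranges_py paragraph_ranges_py paragraph_ranges_py_alt
  rw [foldlA]
  simp only [List.nil_append]
  have hz := zip_pfx ((slkeep (normBody text).toList).map List.length) 0
  simp only [Nat.cast_zero, zero_add, Nat.add_zero] at hz
  rw [filter_eq_brk, brk_eq_pfx _ (norm_ends_nl text)]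
  simp only [List.drop_one, List.tail_cons]
  rw [← hz]
  simp
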